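-- pv_equiv track=rewrite | github.com/jkohans/adventofcode2020 | day19/day19.py | inner_find_matches
-- ===== SOURCE A (Python) =====
-- def inner_find_matches(message, forty_two, thirty_one, match_tracking):
--     result = []
--
--     if not message:
--         return match_tracking
--
--     for option_42 in forty_two:
--         if message.startswith(option_42):
--             remaining_message = message[len(option_42) :]
--             next_match_tracking = match_tracking + [(option_42, 42, remaining_message)]
--             result = result + inner_find_matches(remaining_message, forty_two, thirty_one, next_match_tracking)
--
--     for option_31 in thirty_one:
--         if message.startswith(option_31):
--             remaining_message = message[len(option_31) :]
--             next_match_tracking = match_tracking + [(option_31, 31, remaining_message)]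
--             result = result + inner_find_matches(remaining_message, forty_two, thirty_one, next_match_tracking)
--
--     return result
-- ===== SOURCE B (Python) =====
-- def inner_find_matches(message, forty_two, thirty_one, match_tracking):
--     # Bottom-up DP over suffix positions: paths[i] = all rule-42/31 decomposition
--     # paths of message[i:], shared between branches instead of recomputed.
--     n = len(message)
--     options = [(o, 42) for o in forty_two] + [(o, 31) for o in thirty_one]
--     paths = {n: [[]]}
--     for i in range(n - 1, -1, -1):
--         acc = []
--         for opt, rule in options:
--             l = len(opt)
--             if l and message[i:i + l] == opt:
--                 rest = message[i + l:]
--                 for p in paths[i + l]: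
--                     acc.append([(opt, rule, rest)] + p)
--         paths[i] = acc
--     out = []
--     for p in paths[0]:
--         out.extend(match_tracking + p)
--     return out
-- ===== Notes on version B (the rewrite author's own statement) =====
-- stated objective: alternative
-- what changed: Replaces A's top-down recursive enumeration (which re-explores every suffix once per path reaching it) by a bottom-up dynamic-programming table of decomposition paths per suffix position, shared across branches and flattened once with the tracking prefix.
import Mathlib
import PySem

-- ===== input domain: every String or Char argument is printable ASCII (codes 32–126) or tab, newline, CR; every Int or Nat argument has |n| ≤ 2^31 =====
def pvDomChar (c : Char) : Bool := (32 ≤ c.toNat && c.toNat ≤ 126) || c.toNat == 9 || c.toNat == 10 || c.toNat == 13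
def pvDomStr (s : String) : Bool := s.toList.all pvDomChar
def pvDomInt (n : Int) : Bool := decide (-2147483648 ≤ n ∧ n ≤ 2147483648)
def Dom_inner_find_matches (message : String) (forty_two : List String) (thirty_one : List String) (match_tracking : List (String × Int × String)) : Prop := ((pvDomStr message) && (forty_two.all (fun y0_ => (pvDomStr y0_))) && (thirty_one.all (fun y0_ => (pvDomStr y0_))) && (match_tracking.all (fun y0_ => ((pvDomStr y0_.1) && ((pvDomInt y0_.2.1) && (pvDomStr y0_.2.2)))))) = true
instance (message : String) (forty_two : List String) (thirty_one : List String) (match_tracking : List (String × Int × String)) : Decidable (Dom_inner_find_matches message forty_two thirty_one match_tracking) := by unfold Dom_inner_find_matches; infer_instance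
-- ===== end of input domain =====

-- B replaces A's top-down recursive enumeration by a bottom-up DP table over suffix
-- positions (paths shared between branches); equivalence of the RETURN value is proved.

-- ===== PORT A =====
-- A's recursion consumes a nonempty prefix at every call; the fuel message.length + 1
-- only makes it total in Lean and is sufficient whenever no matched option is empty
-- (exactly Pre_; outside it Python A does not return either).
def pvAGo (fuel : Nat) (message : List Char) (forty_two : List String) (thirty_one : List String) (match_tracking : List (String × Int × String)) : List (String × Int × String) :=
  match fuel with
  | 0 => []
  | Nat.succ fuel =>
    if message = [] then match_tracking
    else
      let result : List (String × Int × String) := []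
      let result := forty_two.foldl (fun result option_42 =>
        if PySem.Chars.startswith message option_42.toList then
          let remaining_message := message.drop option_42.toList.length
          let next_match_tracking := match_tracking ++ [(option_42, (42 : Int), String.ofList remaining_message)]
          result ++ pvAGo fuel remaining_message forty_two thirty_one next_match_tracking
        else result) result
      let result := thirty_one.foldl (fun result option_31 =>
        if PySem.Chars.startswith message option_31.toList then
          let remaining_message := message.drop option_31.toList.length
          let next_match_tracking := match_tracking ++ [(option_31, (31 : Int), String.ofList remaining_message)]
          result ++ pvAGo fuel remaining_message forty_two thirty_one next_match_tracking
        else result) result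
      result

def inner_find_matches (message : String) (forty_two : List String) (thirty_one : List String) (match_tracking : List (String × Int × String)) : List (String × Int × String) :=
  pvAGo (message.toList.length + 1) message.toList forty_two thirty_one match_tracking

-- ===== PORT B =====
-- pvTables options s = the DP table: entry j is Source B's paths[i+j] for the suffix s = message[i:]
-- (head = paths for s itself, built backwards exactly as Source B's loop over i).
def pvTables (options : List (String × Int)) : List Char → List (List (List (String × Int × String)))
  | [] => [[[]]]
  | c :: rest =>
    let tbl := pvTables options rest
    let acc := options.foldl (fun acc p =>
      let l := p.1.toList.length
      if l ≠ 0 ∧ PySem.Chars.startswith (c :: rest) p.1.toList then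
        acc ++ (tbl.getD (l - 1) []).map (fun q => (p.1, p.2, String.ofList ((c :: rest).drop l)) :: q)
      else acc) []
    acc :: tbl

def inner_find_matches_alt (message : String) (forty_two : List String) (thirty_one : List String) (match_tracking : List (String × Int × String)) : List (String × Int × String) :=
  let options := forty_two.map (fun o => (o, (42 : Int))) ++ thirty_one.map (fun o => (o, (31 : Int)))
  ((((pvTables options message.toList).headD []).map (fun p => match_tracking ++ p)).flatten)

-- ===== PRECONDITION & SPEC =====
-- Pre_ excludes the inputs on which Python A raises RecursionError: a nonempty message
-- together with an empty string among the options recurses on the unchanged message forever.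
def Pre_inner_find_matches (message : String) (forty_two : List String) (thirty_one : List String) (match_tracking : List (String × Int × String)) : Prop :=
  message.toList = [] ∨ ("" ∉ forty_two ∧ "" ∉ thirty_one)
instance (message : String) (forty_two : List String) (thirty_one : List String) (match_tracking : List (String × Int × String)) : Decidable (Pre_inner_find_matches message forty_two thirty_one match_tracking) := by unfold Pre_inner_find_matches; infer_instance

def pvWitness_inner_find_matches : String × List String × List String × (List (String × Int × String)) :=
  ("aab", ["a", "aa"], ["b"], [("x", 7, "y")])

def Spec_inner_find_matches (message : String) (forty_two : List String) (thirty_one : List String) (match_tracking : List (String × Int × String)) (out : List (String × Int × String)) : Prop := out = inner_find_matches_alt message forty_two thirty_one match_tracking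
instance (message : String) (forty_two : List String) (thirty_one : List String) (match_tracking : List (String × Int × String)) (out : List (String × Int × String)) : Decidable (Spec_inner_find_matches message forty_two thirty_one match_tracking out) := by unfold Spec_inner_find_matches; infer_instance

-- ===== CLAIM (what is proved, stated in full; the proofs are below) =====
def Claim_equal_inner_find_matches : Prop := ∀ (message : String) (forty_two : List String) (thirty_one : List String) (match_tracking : List (String × Int × String)), Dom_inner_find_matches message forty_two thirty_one match_tracking → Pre_inner_find_matches message forty_two thirty_one match_tracking → Spec_inner_find_matches message forty_two thirty_one match_tracking (inner_find_matches message forty_two thirty_one match_tracking)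


-- ===== LEMMAS AND PROOFS =====

theorem pvDistrib {α β : Type} (mt : List β) (l : List α) (f : α → List (List β)) :
    ((l.flatMap f).map (fun p => mt ++ p)).flatten
      = l.flatMap (fun x => ((f x).map (fun p => mt ++ p)).flatten) := by
  induction l with
  | nil => rfl
  | cons x xs ih => simp_all

theorem pvFlatMap_congr {α β : Type} (l : List α) (f g : α → List β)
    (h : ∀ x ∈ l, f x = g x) : l.flatMap f = l.flatMap g := by
  induction l with
  | nil => rfl
  | cons x xs ih => simp_all

theorem pvTables_getD (o : List (String × Int)) (s : List Char) (j : Nat) (hj : j ≤ s.length) :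
    (pvTables o s).getD j [] = (pvTables o (s.drop j)).headD [] := by
  induction s generalizing j with
  | nil =>
    have : j = 0 := Nat.le_zero.mp hj
    subst this
    rfl
  | cons c rest ih =>
    cases j with
    | zero => rfl
    | succ j =>
      show (pvTables o rest).getD j [] = _
      exact ih j (by simpa using hj)

-- Source B's paths for a suffix s (the head of the DP table).
def pvP (o : List (String × Int)) (s : List Char) : List (List (String × Int × String)) :=
  (pvTables o s).headD []

theorem pvP_nil (o : List (String × Int)) : pvP o [] = [[]] := rfl

theorem pvP_cons (o : List (String × Int)) (c : List Char) (hc : c ≠ []) :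
    pvP o c = o.flatMap (fun p =>
      if p.1.toList.length ≠ 0 ∧ PySem.Chars.startswith c p.1.toList then
        (pvP o (c.drop p.1.toList.length)).map (fun q => (p.1, p.2, String.ofList (c.drop p.1.toList.length)) :: q)
      else []) := by
  obtain ⟨ch, rest, rfl⟩ : ∃ ch rest, c = ch :: rest := by
    cases c with
    | nil => exact absurd rfl hc
    | cons ch rest => exact ⟨ch, rest, rfl⟩
  show (o.foldl _ []) = _
  rw [PySem.List.foldl_congr_mem (g := fun acc p =>
    acc ++ (if p.1.toList.length ≠ 0 ∧ PySem.Chars.startswith (ch :: rest) p.1.toList then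
      (pvP o ((ch :: rest).drop p.1.toList.length)).map (fun q => (p.1, p.2, String.ofList ((ch :: rest).drop p.1.toList.length)) :: q)
    else []))]
  · rw [PySem.List.foldl_append_eq_flatMap]
    rfl
  · intro acc p _
    by_cases h : p.1.toList.length ≠ 0 ∧ PySem.Chars.startswith (ch :: rest) p.1.toList = true
    · rw [if_pos h, if_pos h]
      have hlen : p.1.toList.length - 1 ≤ rest.length := by
        have hpre := (PySem.Chars.startswith_iff (ch :: rest) p.1.toList).mp h.2
        have hle := hpre.length_le
        simp only [List.length_cons] at hle
        omega
      rw [pvTables_getD o rest _ hlen]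
      have hd : rest.drop (p.1.toList.length - 1) = (ch :: rest).drop p.1.toList.length := by
        obtain ⟨k, hk⟩ : ∃ k, p.1.toList.length = k + 1 := ⟨p.1.toList.length - 1, by omega⟩
        simp [hk]
      rw [hd]
      rfl
    · rw [if_neg h, if_neg h, List.append_nil]

-- the main invariant: A's fueled recursion equals flattening B's DP paths
theorem pvMain (forty_two thirty_one : List String)
    (h42 : "" ∉ forty_two) (h31 : "" ∉ thirty_one)
    (fuel : Nat) (s : List Char) (mt : List (String × Int × String))
    (hfuel : s.length < fuel) :
    pvAGo fuel s forty_two thirty_one mt =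
      ((pvP (forty_two.map (fun o => (o, (42 : Int))) ++ thirty_one.map (fun o => (o, (31 : Int)))) s).map
        (fun p => mt ++ p)).flatten := by
  induction fuel generalizing s mt with
  | zero => omega
  | succ fuel ih =>
    by_cases hs : s = []
    · subst hs
      simp [pvAGo, pvP_nil]
    · set o := forty_two.map (fun o => (o, (42 : Int))) ++ thirty_one.map (fun o => (o, (31 : Int))) with ho
      have step : ∀ (opts : List String) (rule : Int) (R : List (String × Int × String)),
          ("" ∉ opts) →
          opts.foldl (fun result option_x =>
            if PySem.Chars.startswith s option_x.toList then
              result ++ pvAGo fuel (s.drop option_x.toList.length) forty_two thirty_one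
                (mt ++ [(option_x, rule, String.ofList (s.drop option_x.toList.length))])
            else result) R
          = R ++ (opts.map (fun x => (x, rule))).flatMap (fun p =>
              if p.1.toList.length ≠ 0 ∧ PySem.Chars.startswith s p.1.toList then
                ((pvP o (s.drop p.1.toList.length)).map
                  (fun q => mt ++ ((p.1, p.2, String.ofList (s.drop p.1.toList.length)) :: q))).flatten
              else []) := by
        intro opts rule R hne
        induction opts generalizing R with
        | nil => simp
        | cons x xs ihx =>
          have hxne : x ≠ "" := fun h => hne (h ▸ List.mem_cons_self)
          have hxs : "" ∉ xs := fun h => hne (List.mem_cons_of_mem _ h)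
          simp only [List.foldl_cons, List.map_cons, List.flatMap_cons]
          rw [ihx _ hxs]
          by_cases hsw : PySem.Chars.startswith s x.toList
          · have hx0 : x.toList.length ≠ 0 := by
              intro h0
              exact hxne (by
                have : x.toList = [] := List.length_eq_zero_iff.mp h0
                cases x; simp_all [String.toList])
            have hdroplt : (s.drop x.toList.length).length < fuel := by
              have : 1 ≤ x.toList.length := by omega
              have := List.length_drop (l := s) (i := x.toList.length)
              have hs1 : 1 ≤ s.length := by
                cases s with
                | nil => exact absurd rfl hs
                | cons a b => simp
              omega
            rw [if_pos hsw, if_pos ⟨hx0, hsw⟩,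
              ih (s.drop x.toList.length) (mt ++ [(x, rule, String.ofList (s.drop x.toList.length))]) hdroplt]
            rw [List.append_assoc]
            congr 2
            apply congrArg
            apply List.map_congr_left
            intro q _
            simp
          · rw [if_neg hsw, if_neg (by tauto), List.nil_append]
      simp only [pvAGo]
      rw [if_neg hs]
      show (thirty_one.foldl _ (forty_two.foldl _ ([] : List (String × Int × String)))) = _
      rw [step forty_two 42 [] h42, step thirty_one 31 _ h31]
      rw [pvP_cons o s hs]
      rw [ho]
      simp only [List.flatMap_append, List.nil_append, List.map_append, List.flatten_append,
        pvDistrib]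
      congr 1 <;>
      · apply pvFlatMap_congr
        intro p _
        split_ifs with h
        · simp [List.map_map, Function.comp_def]
        · simp

-- ===== VERDICT (by name: the statement is the Claim_ definition above) =====
theorem inner_find_matches_spec : Claim_equal_inner_find_matches := by
  intro message forty_two thirty_one match_tracking _ hpre
  unfold Spec_inner_find_matches inner_find_matches inner_find_matches_alt
  rcases hpre with hnil | ⟨h42, h31⟩
  · rw [hnil]
    simp [pvAGo, pvTables]
  · exact pvMain forty_two thirty_one h42 h31 _ _ _ (by omega)
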